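-- pv_equiv track=rewrite | github.com/WhyYum/mpa | analyzer/content_analyzer.py | _is_domain_official
-- ===== SOURCE A (Python) =====
-- def _is_domain_official(sender_domain: str, official_domains: list) -> bool:
--   """Проверить, является ли домен официальным (включая поддомены)"""
--   sender_lower = sender_domain.lower()
--
--   for official in official_domains:
--     official_lower = official.lower()
--     # Точное совпадение
--     if sender_lower == official_lower:
--       return True
--     # Поддомен (accounts.google.com -> google.com)
--     if sender_lower.endswith('.' + official_lower):
--       return True
--
--   return False
-- ===== SOURCE B (Python) =====
-- def _is_domain_official(sender_domain: str, official_domains: list) -> bool: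
--     officials = {official.lower() for official in official_domains}
--     s = sender_domain.lower()
--     if s in officials:
--         return True
--     for i, ch in enumerate(s):
--         if ch == '.' and s[i + 1:] in officials:
--             return True
--     return False
-- ===== Notes on version B (the rewrite author's own statement) =====
-- stated objective: idiomatic
-- what changed: Instead of scanning every official and testing exact-match/endswith('.'+official), B builds a set of lowercased officials once and makes a single pass over the sender's characters, testing the whole sender and each after-a-dot suffix for set membership.
import Mathlib
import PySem

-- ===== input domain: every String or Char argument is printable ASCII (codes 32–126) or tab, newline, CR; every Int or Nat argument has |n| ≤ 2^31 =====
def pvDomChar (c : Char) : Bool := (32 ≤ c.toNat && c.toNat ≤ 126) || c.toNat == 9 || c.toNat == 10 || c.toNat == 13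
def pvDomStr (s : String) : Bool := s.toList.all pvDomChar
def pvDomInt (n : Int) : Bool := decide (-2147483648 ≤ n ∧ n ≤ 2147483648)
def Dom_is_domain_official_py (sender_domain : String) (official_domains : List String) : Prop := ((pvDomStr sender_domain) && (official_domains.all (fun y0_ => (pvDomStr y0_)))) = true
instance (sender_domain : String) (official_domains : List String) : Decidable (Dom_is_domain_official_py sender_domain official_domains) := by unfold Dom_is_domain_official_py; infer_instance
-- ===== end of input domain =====

-- B replaces A's per-official "exact or endswith('.'+official)" scan by one pass over the
-- sender's characters checking each after-a-dot suffix (and the whole sender) against a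
-- set of lowercased officials; objective: idiomatic single pass + set membership.

-- ===== PORT A =====
-- A's for-loop over official_domains with early return
def isOffLoopA (sl : String) : List String → Bool
  | [] => false
  | o :: rest =>
    let ol := PySem.Str.lower o
    if sl == ol then true
    else if PySem.Str.endswith sl (String.ofList ('.' :: ol.toList)) then true
    else isOffLoopA sl rest

def is_domain_official_py (sender_domain : String) (official_domains : List String) : Bool :=
  isOffLoopA (PySem.Str.lower sender_domain) official_domains

-- ===== PORT B =====
-- B's for-loop over the sender's characters: at each '.', test the remaining suffix s[i+1:]
def altLoop (officials : PySem.Set String) : List Char → Bool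
  | [] => false
  | c :: rest =>
    if c == '.' && PySem.Set.contains officials (String.ofList rest) then true
    else altLoop officials rest

def is_domain_official_py_alt (sender_domain : String) (official_domains : List String) : Bool :=
  let officials : PySem.Set String := PySem.Set.ofList (official_domains.map PySem.Str.lower)
  let s := PySem.Str.lower sender_domain
  if PySem.Set.contains officials s then true
  else altLoop officials s.toList

-- ===== PRECONDITION & SPEC =====
def Spec_is_domain_official_py (sender_domain : String) (official_domains : List String) (out : Bool) : Prop := out = is_domain_official_py_alt sender_domain official_domains
instance (sender_domain : String) (official_domains : List String) (out : Bool) : Decidable (Spec_is_domain_official_py sender_domain official_domains out) := by unfold Spec_is_domain_official_py; infer_instance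

-- ===== CLAIM (what is proved, stated in full; the proofs are below) =====
def Claim_equal_is_domain_official_py : Prop := ∀ (sender_domain : String) (official_domains : List String), Dom_is_domain_official_py sender_domain official_domains → Spec_is_domain_official_py sender_domain official_domains (is_domain_official_py sender_domain official_domains)

-- ===== LEMMAS AND PROOFS =====

-- characterisation of A's loop: some official matches exactly or as a dot-suffix
theorem isOffLoopA_iff (sl : String) (ods : List String) :
    isOffLoopA sl ods = true ↔
      ∃ o ∈ ods, sl = PySem.Str.lower o ∨
        ('.' :: (PySem.Str.lower o).toList) <:+ sl.toList := by
  induction ods with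
  | nil => simp [isOffLoopA]
  | cons o rest ih =>
    have hend : PySem.Str.endswith sl (String.ofList ('.' :: (PySem.Str.lower o).toList)) = true
        ↔ ('.' :: (PySem.Str.lower o).toList) <:+ sl.toList := by
      simp only [PySem.Str.endswith_eq, String.toList_ofList]
      exact PySem.Chars.endswith_iff _ _
    by_cases h1 : sl = PySem.Str.lower o
    · simp [isOffLoopA, h1]
    · by_cases h2 : ('.' :: (PySem.Str.lower o).toList) <:+ sl.toList
      · simp only [isOffLoopA, beq_iff_eq, h1, if_false, hend.2 h2, if_true, true_iff]
        exact ⟨o, List.mem_cons_self, Or.inr h2⟩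
      · have : PySem.Str.endswith sl (String.ofList ('.' :: (PySem.Str.lower o).toList)) = false :=
          Bool.eq_false_iff.2 (fun hc => h2 (hend.1 hc))
        simp only [isOffLoopA, beq_iff_eq, h1, if_false, this, Bool.false_eq_true, ih]
        constructor
        · rintro ⟨x, hx, hv⟩; exact ⟨x, List.mem_cons_of_mem _ hx, hv⟩
        · rintro ⟨x, hx, hv⟩
          rcases List.mem_cons.1 hx with rfl | hx
          · rcases hv with hv | hv
            · exact absurd hv h1
            · exact absurd hv h2
          · exact ⟨x, hx, hv⟩

-- characterisation of B's per-character loop: some after-a-dot suffix is in the set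
theorem altLoop_iff (officials : PySem.Set String) (cs : List Char) :
    altLoop officials cs = true ↔
      ∃ t, ('.' :: t) <:+ cs ∧ String.ofList t ∈ officials := by
  induction cs with
  | nil => simp [altLoop]
  | cons c rest ih =>
    by_cases hc : c = '.' ∧ String.ofList rest ∈ officials
    · have hcond : (c == '.' && PySem.Set.contains officials (String.ofList rest)) = true := by
        simp only [Bool.and_eq_true, beq_iff_eq]
        exact ⟨hc.1, (PySem.Set.contains_iff _ _).2 hc.2⟩
      simp only [altLoop, hcond, if_true, true_iff]
      exact ⟨rest, by simp [hc.1], hc.2⟩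
    · have hcond : (c == '.' && PySem.Set.contains officials (String.ofList rest)) = false := by
        rw [Bool.eq_false_iff]
        intro h
        simp only [Bool.and_eq_true, beq_iff_eq] at h
        exact hc ⟨h.1, (PySem.Set.contains_iff _ _).1 h.2⟩
      simp only [altLoop, hcond, Bool.false_eq_true, if_false, ih]
      constructor
      · rintro ⟨t, ht, hm⟩
        exact ⟨t, ht.trans (List.suffix_cons c rest), hm⟩
      · rintro ⟨t, ht, hm⟩
        rcases List.suffix_cons_iff.1 ht with heq | hsuf
        · exfalso
          have h1 : c = '.' := by injection heq with ha _; exact ha.symm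
          have h2 : rest = t := by injection heq with _ hb; exact hb.symm
          exact hc ⟨h1, h2 ▸ hm⟩
        · exact ⟨t, hsuf, hm⟩

-- B without its let-bindings
theorem alt_eq (sd : String) (ods : List String) :
    is_domain_official_py_alt sd ods =
      (if PySem.Set.contains (PySem.Set.ofList (ods.map PySem.Str.lower)) (PySem.Str.lower sd) then true
       else altLoop (PySem.Set.ofList (ods.map PySem.Str.lower)) (PySem.Str.lower sd).toList) := rfl

-- ===== VERDICT (by name: the statement is the Claim_ definition above) =====
theorem is_domain_official_py_spec : Claim_equal_is_domain_official_py := by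
  intro sd ods _
  unfold Spec_is_domain_official_py
  rw [alt_eq]
  unfold is_domain_official_py
  have hmem : ∀ x : String,
      x ∈ PySem.Set.ofList (ods.map PySem.Str.lower) ↔ ∃ o ∈ ods, x = PySem.Str.lower o := by
    intro x
    rw [PySem.Set.mem_ofList, List.mem_map]
    constructor
    · rintro ⟨o, ho, rfl⟩; exact ⟨o, ho, rfl⟩
    · rintro ⟨o, ho, rfl⟩; exact ⟨o, ho, rfl⟩
  by_cases hA : isOffLoopA (PySem.Str.lower sd) ods = true
  · rw [hA]
    rcases (isOffLoopA_iff _ ods).1 hA with ⟨o, ho, hv | hv⟩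
    · have : PySem.Set.contains (PySem.Set.ofList (ods.map PySem.Str.lower)) (PySem.Str.lower sd) = true :=
        (PySem.Set.contains_iff _ _).2 ((hmem _).2 ⟨o, ho, hv⟩)
      rw [this, if_pos rfl]
    · by_cases hc : PySem.Set.contains (PySem.Set.ofList (ods.map PySem.Str.lower)) (PySem.Str.lower sd) = true
      · rw [hc, if_pos rfl]
      · rw [Bool.eq_false_iff.2 hc]
        have hin : String.ofList (PySem.Str.lower o).toList ∈ PySem.Set.ofList (ods.map PySem.Str.lower) := by
          rw [hmem]; exact ⟨o, ho, String.ofList_toList⟩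
        have : altLoop (PySem.Set.ofList (ods.map PySem.Str.lower)) (PySem.Str.lower sd).toList = true :=
          (altLoop_iff _ _).2 ⟨(PySem.Str.lower o).toList, hv, hin⟩
        simp only [Bool.false_eq_true, if_false]
        exact this.symm
  · rw [Bool.eq_false_iff.2 hA]
    symm
    rw [Bool.eq_false_iff]
    intro hB
    apply hA
    rw [isOffLoopA_iff]
    by_cases hc : PySem.Set.contains (PySem.Set.ofList (ods.map PySem.Str.lower)) (PySem.Str.lower sd) = true
    · rcases (hmem _).1 ((PySem.Set.contains_iff _ _).1 hc) with ⟨o, ho, hv⟩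
      exact ⟨o, ho, Or.inl hv⟩
    · rw [Bool.eq_false_iff.2 hc] at hB
      simp only [Bool.false_eq_true, if_false] at hB
      rcases (altLoop_iff _ _).1 hB with ⟨t, ht, hmemt⟩
      rcases (hmem _).1 hmemt with ⟨o, ho, hv⟩
      refine ⟨o, ho, Or.inr ?_⟩
      have : t = (PySem.Str.lower o).toList := by
        have := congrArg String.toList hv; simpa using this
      rwa [this] at ht
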